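-- pv_equiv track=rewrite | github.com/junglingGalen/alvanon_coding_test_Houhongwei | alvanon_coding_test2.py | football_count
-- ===== SOURCE A (Python) =====
-- from typing import List
--
-- def football_count(teamA_scored: List, teamB_scored: List) -> List[int]:
--     res = []
--     for b_score in teamB_scored:
--         cnt = 0
--         for a_score in teamA_scored:
--             if a_score <= b_score:
--                 cnt += 1
--         res.append(cnt)
--     return res
-- ===== SOURCE B (Python) =====
-- def football_count(teamA_scored, teamB_scored):
--     a = sorted(teamA_scored)
--     n = len(a)
--     res = []
--     for b_score in teamB_scored:
--         lo, hi = 0, n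
--         while lo < hi:
--             mid = (lo + hi) // 2
--             if b_score < a[mid]:
--                 hi = mid
--             else:
--                 lo = mid + 1
--         res.append(lo)
--     return res
-- ===== Notes on version B (the rewrite author's own statement) =====
-- stated objective: faster
-- what changed: Sort teamA once, then answer each teamB query with a hand-written binary search (bisect_right) instead of rescanning teamA per query.
import Mathlib
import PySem

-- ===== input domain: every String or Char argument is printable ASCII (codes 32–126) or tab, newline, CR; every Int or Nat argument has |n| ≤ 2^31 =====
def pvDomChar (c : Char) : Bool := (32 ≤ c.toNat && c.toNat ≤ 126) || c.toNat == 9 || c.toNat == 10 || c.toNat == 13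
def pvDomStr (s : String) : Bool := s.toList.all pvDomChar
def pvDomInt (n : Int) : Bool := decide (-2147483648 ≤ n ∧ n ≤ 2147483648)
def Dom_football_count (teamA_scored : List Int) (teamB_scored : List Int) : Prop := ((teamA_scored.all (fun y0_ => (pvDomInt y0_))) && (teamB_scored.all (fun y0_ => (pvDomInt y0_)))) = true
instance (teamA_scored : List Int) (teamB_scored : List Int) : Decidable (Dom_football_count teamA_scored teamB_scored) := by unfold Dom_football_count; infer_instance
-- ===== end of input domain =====

-- B sorts teamA once and answers each teamB query by a hand-written binary search (bisect_right), replacing A's per-query rescan of teamA (objective: faster).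

-- ===== PORT A =====
-- for b_score in teamB_scored: cnt = 0; for a_score in teamA_scored: if a_score <= b_score: cnt += 1; res.append(cnt)
def football_count (teamA_scored : List Int) (teamB_scored : List Int) : List Int :=
  teamB_scored.foldl
    (fun res b_score =>
      res ++ [teamA_scored.foldl (fun cnt a_score => if a_score ≤ b_score then cnt + 1 else cnt) (0 : Int)])
    []

-- ===== PORT B =====
-- the while-loop of Source B: while lo < hi: mid = (lo+hi)//2; if b_score < a[mid]: hi = mid else lo = mid+1
def fcBrLoop (a : List Int) (b_score : Int) (lo hi : Nat) : Nat :=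
  if h : lo < hi then
    let mid := (lo + hi) / 2
    if b_score < a.getD mid 0 then fcBrLoop a b_score lo mid
    else fcBrLoop a b_score (mid + 1) hi
  else lo
termination_by hi - lo
decreasing_by all_goals omega

def football_count_alt (teamA_scored : List Int) (teamB_scored : List Int) : List Int :=
  let a := PySem.List.sorted teamA_scored (fun x => x) false
  let n := a.length
  teamB_scored.foldl (fun res b_score => res ++ [(fcBrLoop a b_score 0 n : Int)]) []

-- ===== PRECONDITION & SPEC =====
def Spec_football_count (teamA_scored : List Int) (teamB_scored : List Int) (out : List Int) : Prop := out = football_count_alt teamA_scored teamB_scored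
instance (teamA_scored : List Int) (teamB_scored : List Int) (out : List Int) : Decidable (Spec_football_count teamA_scored teamB_scored out) := by unfold Spec_football_count; infer_instance

-- ===== CLAIM (what is proved, stated in full; the proofs are below) =====
def Claim_equal_football_count : Prop := ∀ (teamA_scored : List Int) (teamB_scored : List Int), Dom_football_count teamA_scored teamB_scored → Spec_football_count teamA_scored teamB_scored (football_count teamA_scored teamB_scored)

-- ===== LEMMAS AND PROOFS =====

-- both outer loops: foldl-with-append is a map
theorem fc_foldl_app {α β : Type} (f : α → β) (tb : List α) (acc : List β) :
    tb.foldl (fun r b => r ++ [f b]) acc = acc ++ tb.map f := by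
  induction tb generalizing acc with
  | nil => simp
  | cons x xs ih => simp [List.foldl, ih]

-- A's inner loop counts the elements ≤ b_score
theorem fc_inner_count (b : Int) (ta : List Int) (c : Int) :
    ta.foldl (fun cnt a => if a ≤ b then cnt + 1 else cnt) c
      = c + (ta.countP (fun a => decide (a ≤ b)) : Int) := by
  induction ta generalizing c with
  | nil => simp
  | cons x xs ih =>
    simp only [List.foldl, List.countP_cons]
    by_cases hx : x ≤ b <;> simp [hx, ih] <;> try ring

-- the binary search on a sorted list returns the count of elements ≤ b
theorem fc_br_count (s : List Int) (b : Int) (hs : s.Pairwise (· ≤ ·)) :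
    ∀ lo hi, lo ≤ hi → hi ≤ s.length →
      (∀ i, i < lo → (hi' : i < s.length) → s[i] ≤ b) →
      (∀ i, hi ≤ i → (hi' : i < s.length) → b < s[i]) →
      fcBrLoop s b lo hi = s.countP (fun a => decide (a ≤ b)) := by
  intro lo hi
  induction lo, hi using fcBrLoop.induct s b with
  | case1 lo hi h mid hlt ih =>
    intro _ hhi hlow hhigh
    have hmidlt : mid < s.length := by omega
    have hget : s.getD mid 0 = s[mid] := List.getD_eq_getElem s 0 hmidlt
    rw [fcBrLoop, dif_pos h]
    show (if b < s.getD mid 0 then fcBrLoop s b lo mid else fcBrLoop s b (mid + 1) hi) = _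
    rw [if_pos hlt]
    rw [hget] at hlt
    apply ih (by omega) (by omega) hlow
    intro i hi1 hi2
    rcases Nat.lt_or_ge i mid with hc | hc
    · exact absurd hi1 (by omega)
    · rcases Nat.eq_or_lt_of_le hc with hc' | hc'
      · subst hc'; exact hlt
      · exact lt_of_lt_of_le hlt ((List.pairwise_iff_getElem.mp hs) mid i hmidlt hi2 hc')
  | case2 lo hi h mid hlt ih =>
    intro _ hhi hlow hhigh
    have hmidlt : mid < s.length := by omega
    have hget : s.getD mid 0 = s[mid] := List.getD_eq_getElem s 0 hmidlt
    rw [fcBrLoop, dif_pos h]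
    show (if b < s.getD mid 0 then fcBrLoop s b lo mid else fcBrLoop s b (mid + 1) hi) = _
    rw [if_neg hlt]
    rw [hget] at hlt
    rw [not_lt] at hlt
    apply ih (by omega) hhi _ hhigh
    intro i hi1 hi2
    rcases Nat.eq_or_lt_of_le (Nat.le_of_lt_succ hi1) with hc | hc
    · subst hc; exact hlt
    · exact le_trans ((List.pairwise_iff_getElem.mp hs) i mid hi2 hmidlt hc) hlt
  | case3 lo hi h =>
    intro hle hhi hlow hhigh
    rw [fcBrLoop]
    rw [dif_neg h]
    have hlohi : lo = hi := by omega
    subst hlohi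
    -- countP s = lo: the first lo elements satisfy, the rest do not
    conv_rhs => rw [← List.take_append_drop lo s]
    rw [List.countP_append]
    have h1 : (s.take lo).countP (fun a => decide (a ≤ b)) = lo := by
      rw [List.countP_eq_length.mpr, List.length_take_of_le hhi]
      intro x hx
      obtain ⟨i, hi', hx'⟩ := List.mem_iff_getElem.mp hx
      have hilen : i < s.length := by
        have := List.length_take_of_le hhi; omega
      have : x = s[i] := by
        rw [← hx']; exact List.getElem_take
      rw [this]
      exact decide_eq_true (hlow i (by have := List.length_take_of_le hhi; omega) hilen)
    have h2 : (s.drop lo).countP (fun a => decide (a ≤ b)) = 0 := by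
      rw [List.countP_eq_zero]
      intro x hx
      obtain ⟨i, hi', hx'⟩ := List.mem_iff_getElem.mp hx
      have hilen : lo + i < s.length := by
        have := List.length_drop (l := s) (i := lo); omega
      have : x = s[lo + i] := by rw [← hx']; exact (List.getElem_drop ..)
      rw [this]
      simp only [decide_eq_true_eq]
      exact not_le.mpr (hhigh (lo + i) (by omega) hilen)
    omega

-- ===== VERDICT (by name: the statement is the Claim_ definition above) =====
theorem football_count_spec : Claim_equal_football_count := by
  intro ta tb _
  unfold Spec_football_count football_count football_count_alt
  rw [fc_foldl_app, fc_foldl_app]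
  simp only [List.nil_append]
  apply List.map_congr_left
  intro b _
  rw [fc_inner_count]
  have hs : (PySem.List.sorted ta (fun x => x) false).Pairwise (· ≤ ·) := by
    have := PySem.List.sorted_pairwise (xs := ta) (key := fun x => x)
    simpa using this
  rw [fc_br_count _ b hs 0 _ (Nat.zero_le _) le_rfl
        (by intro i hi _; omega) (by intro i _ hi'; omega)]
  rw [(PySem.List.sorted_perm ta (fun x => x) false).countP_eq]
  simp
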